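-- pv_equiv track=rewrite | github.com/j1mmyson/PS | python/baekjoon/unsolved/G5_7662_이중우선순위큐.py | solution
-- ===== SOURCE A (Python) =====
-- import heapq, sys
--
-- def heap_sort(nums):
--     heap = []
--     for num in nums:
--         heapq.heappush(heap, num)
--     sorted_nums = []
--     while heap:
--         sorted_nums.append(heapq.heappop(heap))
--     return sorted_nums
--
-- def solution(operations):
--     heap = []
--     for item in operations:
--         if "I " in item:
--             item = item.replace("I ", "")
--             value = int(item)
--             heapq.heappush(heap, value)
--         elif len(heap) == 0:
--             pass
--         elif "D -" in item:
--             heap = heap_sort(heap)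
--             heap.pop(0)
--         else:
--             heap = heap_sort(heap)
--             heap.pop(-1)
--
--     heap = heap_sort(heap)
--     if len(heap) == 0:
--         return "EMPTY"
--     return str(heap[-1]) + " " +str(heap[0])
-- ===== SOURCE B (Python) =====
-- import bisect
--
-- def solution(operations):
--     # Maintain the multiset as an always-sorted list: bisect-insert on "I",
--     # pop an end on deletes; no heaps, no repeated full sorts.
--     s = []
--     for item in operations:
--         if "I " in item:
--             bisect.insort(s, int(item.replace("I ", "")))
--         elif not s:
--             pass
--         elif "D -" in item:
--             s.pop(0)
--         else:
--             s.pop()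
--     if not s:
--         return "EMPTY"
--     return str(s[-1]) + " " + str(s[0])
-- ===== Notes on version B (the rewrite author's own statement) =====
-- stated objective: alternative
-- what changed: A keeps a binary heap and runs a full heap-sort of the whole heap on every delete (and once at the end); B keeps the multiset as a single always-sorted list (bisect.insort on insert, pop an end on delete), so no heap and no repeated full sorts.
-- outside the precondition, e.g. on solution(['I x']): A raises ValueError, B raises ValueError; on solution(['aI 3']): A raises ValueError, B raises ValueError
import Mathlib
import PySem

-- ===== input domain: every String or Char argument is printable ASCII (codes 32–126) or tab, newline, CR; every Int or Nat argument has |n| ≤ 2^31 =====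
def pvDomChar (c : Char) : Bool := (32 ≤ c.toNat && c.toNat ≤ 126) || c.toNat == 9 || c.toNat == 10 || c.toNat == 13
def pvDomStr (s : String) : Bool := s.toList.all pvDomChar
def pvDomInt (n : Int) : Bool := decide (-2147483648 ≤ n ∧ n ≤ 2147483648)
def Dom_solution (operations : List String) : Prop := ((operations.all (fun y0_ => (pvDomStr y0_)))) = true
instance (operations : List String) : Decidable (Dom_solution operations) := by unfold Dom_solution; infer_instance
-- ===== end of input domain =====

-- B replaces A's heap + full re-sort per delete by one always-sorted list (bisect insert, end pops): a different data structure, same cost on insert-heavy inputs.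


-- ===== PORT A =====
-- heapq._siftdown(heap, startpos, pos) with newitem = heap[pos] read once at entry;
-- fuel = pos bounds the loop (pos strictly decreases), so the recursion is structural
def siftdownLoop (fuel : Nat) (heap : List Int) (startpos pos : Nat) (newitem : Int) : List Int :=
  match fuel with
  | 0 => heap.set pos newitem
  | fuel + 1 =>
    if pos > startpos then
      let parentpos := (pos - 1) / 2
      let parent := heap.getD parentpos 0
      if newitem < parent then
        siftdownLoop fuel (heap.set pos parent) startpos parentpos newitem
      else heap.set pos newitem
    else heap.set pos newitem

-- heapq.heappush: append, then sift the new last element down towards the root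
def heappushA (heap : List Int) (item : Int) : List Int :=
  siftdownLoop ((heap ++ [item]).length - 1) (heap ++ [item]) 0 ((heap ++ [item]).length - 1) item

-- the while-loop of heapq._siftup: move the hole at pos to a leaf, copying the smaller
-- child up; fuel = endpos bounds the loop (endpos - pos strictly decreases)
def siftupLoop (fuel : Nat) (heap : List Int) (pos endpos : Nat) : List Int × Nat :=
  match fuel with
  | 0 => (heap, pos)
  | fuel + 1 =>
    if 2 * pos + 1 < endpos then
      let childpos :=
        if 2 * pos + 2 < endpos && !(heap.getD (2 * pos + 1) 0 < heap.getD (2 * pos + 2) 0)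
        then 2 * pos + 2 else 2 * pos + 1
      siftupLoop fuel (heap.set pos (heap.getD childpos 0)) childpos endpos
    else (heap, pos)

-- heapq._siftup(heap, pos): leaf-sift then heap[pos] = newitem and _siftdown back up
def siftupA (heap : List Int) (pos : Nat) : List Int :=
  let endpos := heap.length
  let startpos := pos
  let newitem := heap.getD pos 0
  let r := siftupLoop heap.length heap pos endpos
  siftdownLoop r.2 (r.1.set r.2 newitem) startpos r.2 newitem

-- heapq.heappop (callers only invoke it on a non-empty heap)
def heappopA (heap : List Int) : Int × List Int :=
  let lastelt := heap.getLast?.getD 0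
  let rest := heap.dropLast
  if rest.length ≠ 0 then
    (rest.getD 0 0, siftupA (rest.set 0 lastelt) 0)
  else (lastelt, [])

-- 'while heap: sorted_nums.append(heapq.heappop(heap))'; fuel = the heap's length
-- (each heappop removes one element)
def popAllA (fuel : Nat) (heap : List Int) (acc : List Int) : List Int :=
  match fuel with
  | 0 => acc
  | fuel + 1 =>
    if heap = [] then acc
    else popAllA fuel (heappopA heap).2 (acc ++ [(heappopA heap).1])

-- heap_sort(nums) from A
def heapSortA (nums : List Int) : List Int :=
  let heap := nums.foldl (fun h num => heappushA h num) []
  popAllA heap.length heap []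

def solution (operations : List String) : String :=
  let heap := operations.foldl (fun heap item =>
    if PySem.Str.isIn "I " item then
      match PySem.Int.ofStr? (PySem.Str.replace item "I " "") with
      | some value => heappushA heap value
      | none => heap          -- Python raises ValueError here; excluded by Pre_solution
    else if heap.length = 0 then heap
    else if PySem.Str.isIn "D -" item then
      (heapSortA heap).tail        -- heap = heap_sort(heap); heap.pop(0)
    else
      (heapSortA heap).dropLast    -- heap = heap_sort(heap); heap.pop(-1)
    ) []
  let heap := heapSortA heap
  if heap.length = 0 then "EMPTY"
  else PySem.Int.toStr ((PySem.List.pyGet? heap (-1)).getD 0) ++ " " ++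
       PySem.Int.toStr ((PySem.List.pyGet? heap 0).getD 0)

-- ===== PORT B =====
-- bisect.insort: insert x into the sorted list s, after any elements equal to x
def insortB (s : List Int) (x : Int) : List Int :=
  match s with
  | [] => [x]
  | h :: t => if x < h then x :: h :: t else h :: insortB t x

def solution_alt (operations : List String) : String :=
  let s := operations.foldl (fun s item =>
    if PySem.Str.isIn "I " item then
      match PySem.Int.ofStr? (PySem.Str.replace item "I " "") with
      | some value => insortB s value
      | none => s             -- Python raises ValueError here; excluded by Pre_solution
    else if s = [] then s
    else if PySem.Str.isIn "D -" item then s.tail   -- s.pop(0)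
    else s.dropLast                                  -- s.pop()
    ) []
  if s = [] then "EMPTY"
  else PySem.Int.toStr ((PySem.List.pyGet? s (-1)).getD 0) ++ " " ++
       PySem.Int.toStr ((PySem.List.pyGet? s 0).getD 0)

-- ===== PRECONDITION & SPEC =====
-- Pre_ excludes exactly the inputs where Python's int() raises ValueError: an operation
-- containing "I " whose text after deleting every "I " is not an int literal.
def Pre_solution (operations : List String) : Prop :=
  ∀ item ∈ operations, PySem.Str.isIn "I " item = true →
    (PySem.Int.ofStr? (PySem.Str.replace item "I " "")).isSome = true
instance (operations : List String) : Decidable (Pre_solution operations) := by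
  unfold Pre_solution; infer_instance

def pvWitness_solution : List String := ["I 16", "I 1", "D 1", "I -3", "D -1", "I 7"]

def Spec_solution (operations : List String) (out : String) : Prop := out = solution_alt operations
instance (operations : List String) (out : String) : Decidable (Spec_solution operations out) := by
  unfold Spec_solution; infer_instance

-- ===== CLAIM (what is proved, stated in full; the proofs are below) =====
def Claim_equal_solution : Prop := ∀ (operations : List String), Dom_solution operations → Pre_solution operations → Spec_solution operations (solution operations)

-- ===== LEMMAS AND PROOFS =====

-- the binary-heap shape invariant of heapq
def HeapInv (l : List Int) : Prop :=
  ∀ i, 0 < i → i < l.length → l.getD ((i - 1) / 2) 0 ≤ l.getD i 0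

-- getD/set bookkeeping
theorem pvGetD_set_self (l : List Int) (i : Nat) (a : Int) (h : i < l.length) :
    (l.set i a).getD i 0 = a := by
  simp [List.getD_eq_getElem?_getD, List.getElem?_set_self h]

theorem pvGetD_set_ne (l : List Int) (i j : Nat) (a : Int) (h : i ≠ j) :
    (l.set i a).getD j 0 = l.getD j 0 := by
  simp [List.getD_eq_getElem?_getD, List.getElem?_set_ne h]

-- pulling the j-th element to the front is a permutation
theorem pvCons_set_perm (l : List Int) (j : Nat) (a : Int) (h : j < l.length) :
    (l.getD j 0 :: l.set j a).Perm (a :: l) := by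
  induction l generalizing j with
  | nil => simp at h
  | cons b t ih =>
    cases j with
    | zero => simpa using List.Perm.swap a b t
    | succ j =>
      have hj : j < t.length := by simpa using h
      simp only [List.getD_cons_succ, List.set_cons_succ]
      have h1 : (t.getD j 0 :: b :: t.set j a).Perm (b :: t.getD j 0 :: t.set j a) :=
        List.Perm.swap _ _ _
      exact h1.trans (((ih j hj).cons b).trans (List.Perm.swap a b t))

theorem pvSwap_set_perm_lt (l : List Int) (i j : Nat) (hij : i < j) (hj : j < l.length) :
    ((l.set i (l.getD j 0)).set j (l.getD i 0)).Perm l := by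
  induction l generalizing i j with
  | nil => simp at hj
  | cons b t ih =>
    cases i with
    | zero =>
      obtain ⟨j, rfl⟩ : ∃ j', j = j' + 1 := ⟨j - 1, by omega⟩
      have hj' : j < t.length := by simpa using hj
      simpa using pvCons_set_perm t j b hj'
    | succ i =>
      obtain ⟨j, rfl⟩ : ∃ j', j = j' + 1 := ⟨j - 1, by omega⟩
      have hj' : j < t.length := by simpa using hj
      simpa using (ih i j (by omega) hj').cons b

theorem pvSwap_set_perm (l : List Int) (i j : Nat) (hij : i ≠ j) (hi : i < l.length)
    (hj : j < l.length) : ((l.set i (l.getD j 0)).set j (l.getD i 0)).Perm l := by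
  rcases Nat.lt_or_ge i j with h | h
  · exact pvSwap_set_perm_lt l i j h hj
  · rw [List.set_comm _ _ hij]
    exact pvSwap_set_perm_lt l j i (by omega) hi

-- _siftdown permutes: the result is the input with newitem written into the hole
theorem pvSdl_perm : ∀ (fuel : Nat) (heap : List Int) (pos : Nat) (x : Int), pos ≤ fuel →
    pos < heap.length → (siftdownLoop fuel heap 0 pos x).Perm (heap.set pos x) := by
  intro fuel
  induction fuel with
  | zero => intro heap pos x hf hp; exact List.Perm.refl _
  | succ fuel ih =>
    intro heap pos x hf hp
    rw [siftdownLoop]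
    dsimp only
    split
    · split
      · next hgt hlt =>
        have hpp : (pos - 1) / 2 < pos := by omega
        have h1 := ih (heap.set pos (heap.getD ((pos - 1) / 2) 0)) ((pos - 1) / 2) x
          (by omega) (by simp; omega)
        refine h1.trans ?_
        have hne : pos ≠ (pos - 1) / 2 := by omega
        have e1 : (heap.set pos x).getD ((pos - 1) / 2) 0 = heap.getD ((pos - 1) / 2) 0 :=
          pvGetD_set_ne heap pos ((pos - 1) / 2) x hne
        have e2 : (heap.set pos x).getD pos 0 = x := pvGetD_set_self heap pos x hp
        have e3 : ((heap.set pos x).set pos ((heap.set pos x).getD ((pos - 1) / 2) 0)).set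
              ((pos - 1) / 2) ((heap.set pos x).getD pos 0)
            = (heap.set pos (heap.getD ((pos - 1) / 2) 0)).set ((pos - 1) / 2) x := by
          rw [e1, e2, List.set_set]
        rw [← e3]
        exact pvSwap_set_perm (heap.set pos x) pos ((pos - 1) / 2) hne (by simpa using hp)
          (by simp; omega)
      · exact List.Perm.refl _
    · exact List.Perm.refl _

-- 'almost a heap': the pair (parent pos, pos) may be violated; children of pos are
-- bounded below by the grandparent
def AlmostInv (l : List Int) (pos : Nat) : Prop :=
  (∀ i, 0 < i → i < l.length → i ≠ pos → l.getD ((i - 1) / 2) 0 ≤ l.getD i 0) ∧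
  (0 < pos → ∀ j, j < l.length → (j - 1) / 2 = pos → l.getD ((pos - 1) / 2) 0 ≤ l.getD j 0)

theorem pvSdl_inv : ∀ (fuel : Nat) (heap : List Int) (pos : Nat) (x : Int), pos ≤ fuel →
    pos < heap.length →
    AlmostInv (heap.set pos x) pos → HeapInv (siftdownLoop fuel heap 0 pos x) := by
  intro fuel
  induction fuel with
  | zero =>
    intro heap pos x hf hp hA
    have hpos0 : pos = 0 := by omega
    subst hpos0
    simp only [siftdownLoop]
    intro i hi0 hilen
    exact hA.1 i hi0 (by simpa using hilen) (by omega)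
  | succ fuel ih =>
    intro heap pos x hf hp hA
    obtain ⟨C1, C2⟩ := hA
    rw [siftdownLoop]
    dsimp only
    split
    · next hgt =>
      set pp := (pos - 1) / 2 with hppdef
      have hpppos : pp < pos := by omega
      split
      · next hlt =>
        -- recurse: establish AlmostInv for the new hole pp
        apply ih _ pp x (by omega) (by simp; omega)
        have hne : pos ≠ pp := by omega
        have hset : ((heap.set pos (heap.getD pp 0)).set pp x)
            = ((heap.set pos x).set pos (heap.getD pp 0)).set pp x := by rw [List.set_set]
        set l := heap.set pos x with hldef
        have hlen : l.length = heap.length := by simp [hldef]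
        have hLpos : l.getD pos 0 = x := pvGetD_set_self heap pos x hp
        have hLpp : l.getD pp 0 = heap.getD pp 0 := pvGetD_set_ne heap pos pp x hne
        -- the list after one hole move, written as a set-swap of l
        have e2 : (heap.set pos (heap.getD pp 0)).set pp x
            = (l.set pos (l.getD pp 0)).set pp (l.getD pos 0) := by
          rw [hLpos, hLpp, hldef, List.set_set]
        rw [e2]
        set l2 := (l.set pos (l.getD pp 0)).set pp (l.getD pos 0) with hl2def
        have hl2len : l2.length = heap.length := by simp [hl2def, hldef]
        have g2pp : l2.getD pp 0 = x := by
          rw [hl2def, hLpos]; exact pvGetD_set_self _ pp x (by simp [hldef]; omega)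
        have g2pos : l2.getD pos 0 = heap.getD pp 0 := by
          rw [hl2def, pvGetD_set_ne _ pp pos _ (by omega), hLpp]
          exact pvGetD_set_self _ pos _ (by simp [hldef]; omega)
        have g2other : ∀ k, k ≠ pos → k ≠ pp → l2.getD k 0 = l.getD k 0 := by
          intro k h1 h2
          rw [hl2def, pvGetD_set_ne _ pp k _ (fun h => h2 h.symm),
            pvGetD_set_ne _ pos k _ (fun h => h1 h.symm)]
        have gother : ∀ k, k ≠ pos → l.getD k 0 = heap.getD k 0 := fun k h1 =>
          pvGetD_set_ne heap pos k x (fun h => h1 h.symm)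
        constructor
        · intro i hi0 hilen hipp
          rw [hl2len] at hilen
          by_cases hipos : i = pos
          · subst hipos
            rw [g2pos]
            have : (i - 1) / 2 = pp := rfl
            rw [this, g2pp]
            exact le_of_lt hlt
          · by_cases hpari : (i - 1) / 2 = pos
            · rw [hpari, g2pos, g2other i hipos hipp]
              have hc2 := C2 (by omega) i (by simp [hldef]; omega) hpari
              rw [hLpp] at hc2
              exact hc2
            · -- i ∉ {pos, pp}, parent i ≠ pos
              rw [g2other i hipos hipp]
              have hCi := C1 i hi0 (by simp [hldef]; omega) hipos
              by_cases hparpp : (i - 1) / 2 = pp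
              · rw [hparpp, g2pp]
                calc x ≤ heap.getD pp 0 := le_of_lt hlt
                  _ = l.getD pp 0 := hLpp.symm
                  _ = l.getD ((i - 1) / 2) 0 := by rw [hparpp]
                  _ ≤ l.getD i 0 := hCi
              · rw [g2other _ (by omega) hparpp]
                exact hCi
        · intro hpp0 j hjlen hparj
          rw [hl2len] at hjlen
          have hq : (pp - 1) / 2 ≠ pos := by omega
          have hq2 : (pp - 1) / 2 ≠ pp := by omega
          rw [g2other _ hq hq2]
          have hgq : l.getD ((pp - 1) / 2) 0 ≤ l.getD pp 0 :=
            C1 pp hpp0 (by simp [hldef]; omega) (by omega)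
          by_cases hjpos : j = pos
          · subst hjpos
            rw [g2pos, ← hLpp]
            exact hgq
          · have hjpp : j ≠ pp := by omega
            rw [g2other j hjpos hjpp]
            have hC1j := C1 j (by omega) (by simp [hldef]; omega) hjpos
            rw [hparj] at hC1j
            exact le_trans hgq hC1j
      · next hnlt =>
        -- newitem placed at pos: the heap property holds outright
        intro i hi0 hilen
        simp only [List.length_set] at hilen
        by_cases hipos : i = pos
        · subst hipos
          rw [pvGetD_set_self heap i x (by omega), pvGetD_set_ne heap i ((i-1)/2) x (by omega)]
          rw [← hppdef]
          omega
        · exact C1 i hi0 (by simpa using hilen) hipos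
    · next hngt =>
      have hpos0 : pos = 0 := by omega
      subst hpos0
      intro i hi0 hilen
      exact C1 i hi0 (by simpa using hilen) (by omega)

theorem pvSet_append_last (h : List Int) (x y : Int) : (h ++ [x]).set h.length y = h ++ [y] := by
  induction h with
  | nil => rfl
  | cons a t ih => simpa using ih

theorem pvGetD_append_left (l : List Int) (x : Int) (i : Nat) (hi : i < l.length) :
    (l ++ [x]).getD i 0 = l.getD i 0 := by
  simp [List.getD_eq_getElem?_getD, List.getElem?_append_left hi]

theorem pvHeappush_perm (h : List Int) (x : Int) : (heappushA h x).Perm (x :: h) := by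
  unfold heappushA
  have hlen : (h ++ [x]).length - 1 = h.length := by simp
  rw [hlen]
  refine ((pvSdl_perm h.length (h ++ [x]) h.length x (le_refl _) (by simp)).trans ?_)
  rw [pvSet_append_last]
  exact List.perm_append_singleton x h

theorem pvHeappush_inv (h : List Int) (x : Int) (H : HeapInv h) : HeapInv (heappushA h x) := by
  unfold heappushA
  have hlen : (h ++ [x]).length - 1 = h.length := by simp
  rw [hlen]
  apply pvSdl_inv h.length _ h.length x (le_refl _) (by simp)
  rw [pvSet_append_last]
  constructor
  · intro i hi0 hilen hine
    have hi : i < h.length := by simp at hilen; omega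
    have hpar : (i - 1) / 2 < h.length := by omega
    rw [pvGetD_append_left _ _ _ hi, pvGetD_append_left _ _ _ hpar]
    exact H i hi0 hi
  · intro hpos0 j hjlen hparj
    simp at hjlen
    omega

-- hole invariant for _siftup: the heap property may fail only on pairs touching the hole
-- at pos; children of the hole are bounded below by the hole's parent
def HoleInv (l : List Int) (pos : Nat) : Prop :=
  (∀ i, 0 < i → i < l.length → i ≠ pos → (i - 1) / 2 ≠ pos →
      l.getD ((i - 1) / 2) 0 ≤ l.getD i 0) ∧
  (0 < pos → ∀ j, j < l.length → (j - 1) / 2 = pos →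
      l.getD ((pos - 1) / 2) 0 ≤ l.getD j 0)

-- moving the hole from pos to the smaller child c keeps HoleInv
theorem pvHole_step (heap : List Int) (pos c : Nat) (hp : pos < heap.length)
    (hc1 : c = 2 * pos + 1 ∨ c = 2 * pos + 2) (hc2 : c < heap.length)
    (hmin : ∀ o, (o = 2 * pos + 1 ∨ o = 2 * pos + 2) → o ≠ c → o < heap.length →
      heap.getD c 0 ≤ heap.getD o 0)
    (H : HoleInv heap pos) : HoleInv (heap.set pos (heap.getD c 0)) c := by
  obtain ⟨H1, H2⟩ := H
  have hposc : pos ≠ c := by omega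
  constructor
  · intro i hi0 hilen hic hparc
    simp only [List.length_set] at hilen
    by_cases hipos : i = pos
    · subst hipos
      have hpos0 : 0 < i := hi0
      rw [pvGetD_set_self heap i _ hp, pvGetD_set_ne heap i ((i - 1) / 2) _ (by omega)]
      exact H2 hi0 c hc2 (by omega)
    · rw [pvGetD_set_ne heap pos i _ (fun h => hipos h.symm)]
      by_cases hpari : (i - 1) / 2 = pos
      · rw [hpari, pvGetD_set_self heap pos _ hp]
        exact hmin i (by omega) hic hilen
      · rw [pvGetD_set_ne heap pos ((i - 1) / 2) _ (fun h => hpari h.symm)]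
        exact H1 i hi0 hilen hipos hpari
  · intro hc0 j hjlen hparj
    simp only [List.length_set] at hjlen
    have hparc : (c - 1) / 2 = pos := by omega
    have hjc : c < j := by omega
    rw [hparc, pvGetD_set_self heap pos _ hp,
      pvGetD_set_ne heap pos j _ (by omega)]
    have := H1 j (by omega) hjlen (by omega) (by omega)
    rwa [hparj] at this

-- a hole move followed by writing y is a permutation of writing y at the original hole
theorem pvSet_step_perm (heap : List Int) (pos c : Nat) (hpos : pos < heap.length)
    (hc : c < heap.length) (hne : pos ≠ c) (y : Int) :
    ((heap.set pos (heap.getD c 0)).set c y).Perm (heap.set pos y) := by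
  have e1 : (heap.set pos y).getD c 0 = heap.getD c 0 := pvGetD_set_ne heap pos c y hne
  have e2 : (heap.set pos y).getD pos 0 = y := pvGetD_set_self heap pos y hpos
  have e3 : (heap.set pos (heap.getD c 0)).set c y
      = ((heap.set pos y).set pos ((heap.set pos y).getD c 0)).set c
          ((heap.set pos y).getD pos 0) := by
    rw [e1, e2, List.set_set]
  rw [e3]
  exact pvSwap_set_perm (heap.set pos y) pos c hne (by simpa using hpos) (by simpa using hc)

-- full specification of the _siftup while loop (hole sifts to a leaf)
theorem pvSul_spec : ∀ (n : Nat) (heap : List Int) (pos : Nat), heap.length - pos ≤ n →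
    pos < heap.length → HoleInv heap pos →
    (siftupLoop n heap pos heap.length).1.length = heap.length ∧
    (siftupLoop n heap pos heap.length).2 < heap.length ∧
    heap.length ≤ 2 * (siftupLoop n heap pos heap.length).2 + 1 ∧
    HoleInv (siftupLoop n heap pos heap.length).1 (siftupLoop n heap pos heap.length).2 ∧
    ∀ y : Int, ((siftupLoop n heap pos heap.length).1.set
      (siftupLoop n heap pos heap.length).2 y).Perm (heap.set pos y) := by
  intro n
  induction n with
  | zero => intro heap pos hn hp _; exact absurd hp (by omega)
  | succ n ih =>
    intro heap pos hn hp H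
    rw [siftupLoop]
    dsimp only
    split
    · next hchild =>
      split
      · next hcond =>
        -- right child exists and is the smaller one: c = 2*pos+2
        simp only [Bool.and_eq_true, Bool.not_eq_eq_eq_not, Bool.not_true, decide_eq_true_eq,
          decide_eq_false_iff_not, not_lt] at hcond
        obtain ⟨hrlt, hrle⟩ := hcond
        have hH' := pvHole_step heap pos (2 * pos + 2) hp (by omega) hrlt
          (by intro o ho hoc holen
              have : o = 2 * pos + 1 := by omega
              subst this; exact hrle)
          H
        have hlen' : (heap.set pos (heap.getD (2 * pos + 2) 0)).length = heap.length := by simp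
        have := ih (heap.set pos (heap.getD (2 * pos + 2) 0)) (2 * pos + 2)
          (by rw [hlen']; omega) (by rw [hlen']; omega) hH'
        rw [hlen'] at this
        obtain ⟨L, R2, Leaf, HI, HPm⟩ := this
        refine ⟨L, R2, Leaf, HI, ?_⟩
        intro y
        exact (HPm y).trans (pvSet_step_perm heap pos (2 * pos + 2) hp (by omega) (by omega) y)
      · next hcond =>
        -- left child c = 2*pos+1
        simp only [Bool.and_eq_true, Bool.not_eq_eq_eq_not, Bool.not_true, decide_eq_true_eq,
          decide_eq_false_iff_not, not_lt, not_and, Bool.not_eq_false] at hcond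
        have hH' := pvHole_step heap pos (2 * pos + 1) hp (by omega) hchild
          (by intro o ho hoc holen
              have : o = 2 * pos + 2 := by omega
              subst this
              have := hcond holen
              simp only [decide_eq_true_eq] at this
              omega)
          H
        have hlen' : (heap.set pos (heap.getD (2 * pos + 1) 0)).length = heap.length := by simp
        have := ih (heap.set pos (heap.getD (2 * pos + 1) 0)) (2 * pos + 1)
          (by rw [hlen']; omega) (by rw [hlen']; omega) hH'
        rw [hlen'] at this
        obtain ⟨L, R2, Leaf, HI, HPm⟩ := this
        refine ⟨L, R2, Leaf, HI, ?_⟩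
        intro y
        exact (HPm y).trans (pvSet_step_perm heap pos (2 * pos + 1) hp (by omega) (by omega) y)
    · next hchild =>
      exact ⟨rfl, hp, by omega, H, fun y => List.Perm.refl _⟩

-- _siftup from the root of a heap with a hole at 0 restores the heap and permutes
theorem pvSiftupA_spec (heap : List Int) (h0 : 0 < heap.length) (H : HoleInv heap 0) :
    HeapInv (siftupA heap 0) ∧ (siftupA heap 0).Perm heap := by
  unfold siftupA
  dsimp only
  obtain ⟨L, R2, Leaf, HI, HPm⟩ := pvSul_spec heap.length heap 0 (by omega) h0 H
  set r := siftupLoop heap.length heap 0 heap.length with hr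
  set ni := heap.getD 0 0 with hni
  constructor
  · apply pvSdl_inv r.2 (r.1.set r.2 ni) r.2 ni (le_refl _) (by simp [L]; omega)
    rw [List.set_set]
    constructor
    · intro i hi0 hilen hine
      simp only [List.length_set, L] at hilen
      have hpar : (i - 1) / 2 ≠ r.2 := by omega
      rw [pvGetD_set_ne r.1 r.2 i _ (fun h => hine h.symm),
        pvGetD_set_ne r.1 r.2 ((i - 1) / 2) _ (fun h => hpar h.symm)]
      exact HI.1 i hi0 (by omega) hine hpar
    · intro hr0 j hjlen hparj
      simp only [List.length_set, L] at hjlen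
      omega
  · refine (pvSdl_perm r.2 (r.1.set r.2 ni) r.2 ni (le_refl _) (by simp [L]; omega)).trans ?_
    rw [List.set_set]
    refine (HPm ni).trans ?_
    rw [hni, List.getD_eq_getElem heap 0 h0, List.set_getElem_self]

-- heappop of a non-empty valid heap: returns the root (the minimum), permutes, stays a heap
theorem pvHeappop_spec (heap : List Int) (hne : heap ≠ []) (H : HeapInv heap) :
    (heappopA heap).1 = heap.getD 0 0 ∧
    ((heappopA heap).1 :: (heappopA heap).2).Perm heap ∧ HeapInv (heappopA heap).2 := by
  have hlenpos : 0 < heap.length := List.length_pos_of_ne_nil hne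
  unfold heappopA
  dsimp only
  split
  · next hrest =>
    have hrlen : heap.dropLast.length = heap.length - 1 := List.length_dropLast
    have hrpos : 0 < heap.dropLast.length := by omega
    have hfst : heap.dropLast.getD 0 0 = heap.getD 0 0 := by
      simp only [List.getD_eq_getElem?_getD, List.getElem?_dropLast]
      rw [if_pos (by omega)]
    set le := heap.getLast?.getD 0 with hle
    have hgl : le = heap.getLast hne := by
      rw [hle, List.getLast?_eq_getLast hne]; rfl
    have hheap : heap.dropLast ++ [le] = heap := by
      rw [hgl]; exact List.dropLast_append_getLast hne
    have hHole : HoleInv (heap.dropLast.set 0 le) 0 := by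
      constructor
      · intro i hi0 hilen hine hparne
        simp only [List.length_set] at hilen
        have hpar1 : 0 < (i - 1) / 2 := by omega
        rw [pvGetD_set_ne _ 0 i _ (by omega), pvGetD_set_ne _ 0 ((i - 1) / 2) _ (by omega)]
        have ei : heap.dropLast.getD i 0 = heap.getD i 0 := by
          simp only [List.getD_eq_getElem?_getD, List.getElem?_dropLast]
          rw [if_pos (by omega)]
        have ep : heap.dropLast.getD ((i - 1) / 2) 0 = heap.getD ((i - 1) / 2) 0 := by
          simp only [List.getD_eq_getElem?_getD, List.getElem?_dropLast]
          rw [if_pos (by omega)]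
        rw [ei, ep]
        exact H i hi0 (by omega)
      · intro h00; omega
    obtain ⟨SI, SP⟩ := pvSiftupA_spec (heap.dropLast.set 0 le) (by simpa using hrpos) hHole
    refine ⟨hfst, ?_, SI⟩
    refine (SP.cons _).trans ?_
    refine (pvCons_set_perm heap.dropLast 0 le hrpos).trans ?_
    exact (List.perm_append_singleton le heap.dropLast).symm.trans (by rw [hheap])
  · next hrest =>
    have h1 : heap.length = 1 := by
      have := List.length_dropLast (xs := heap); omega
    obtain ⟨a, rfl⟩ := List.length_eq_one_iff.mp h1
    refine ⟨by simp, by simp, ?_⟩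
    intro i hi0 hilen
    simp at hilen

-- the root of a valid heap is its minimum
theorem pvHead_min (heap : List Int) (H : HeapInv heap) : ∀ y ∈ heap, heap.getD 0 0 ≤ y := by
  have Hi : ∀ i, i < heap.length → heap.getD 0 0 ≤ heap.getD i 0 := by
    intro i
    induction i using Nat.strong_induction_on with
    | _ i ih =>
      intro hi
      by_cases h0 : i = 0
      · subst h0; exact le_refl _
      · exact le_trans (ih ((i - 1) / 2) (by omega) (by omega)) (H i (by omega) hi)
  intro y hy
  obtain ⟨i, hi, rfl⟩ := List.mem_iff_getElem.mp hy
  have := Hi i hi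
  rwa [List.getD_eq_getElem _ _ hi] at this

-- the pop-all loop turns a valid heap into an ascending list of its elements
theorem pvPopAll_spec : ∀ (n : Nat) (heap acc : List Int), heap.length ≤ n → HeapInv heap →
    acc.Pairwise (· ≤ ·) → (∀ a ∈ acc, ∀ y ∈ heap, a ≤ y) →
    (popAllA n heap acc).Perm (acc ++ heap) ∧ (popAllA n heap acc).Pairwise (· ≤ ·) := by
  intro n
  induction n with
  | zero =>
    intro heap acc hn H hacc hbound
    cases heap with
    | nil => exact ⟨by simp [popAllA], hacc⟩
    | cons a t => simp at hn
  | succ n ih =>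
    intro heap acc hn H hacc hbound
    rw [popAllA]
    split
    · next hemp => subst hemp; exact ⟨by simp, hacc⟩
    · next hemp =>
      obtain ⟨hfst, hperm, hinv⟩ := pvHeappop_spec heap hemp H
      have hvmem : (heappopA heap).1 ∈ heap := hperm.mem_iff.mp List.mem_cons_self
      have hvmin : ∀ y ∈ heap, (heappopA heap).1 ≤ y := by
        intro y hy; rw [hfst]; exact pvHead_min heap H y hy
      have hsub : ∀ y ∈ (heappopA heap).2, y ∈ heap := fun y hy =>
        hperm.mem_iff.mp (List.mem_cons_of_mem _ hy)
      have hlen' : (heappopA heap).2.length ≤ n := by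
        have := hperm.length_eq; simp at this; omega
      have hacc' : (acc ++ [(heappopA heap).1]).Pairwise (· ≤ ·) := by
        rw [List.pairwise_append]
        refine ⟨hacc, by simp, ?_⟩
        intro a ha b hb
        simp only [List.mem_singleton] at hb
        subst hb
        exact hbound a ha _ hvmem
      have hbound' : ∀ a ∈ acc ++ [(heappopA heap).1], ∀ y ∈ (heappopA heap).2, a ≤ y := by
        intro a ha y hy
        rcases List.mem_append.mp ha with h | h
        · exact hbound a h y (hsub y hy)
        · simp only [List.mem_singleton] at h
          subst h
          exact hvmin y (hsub y hy)
      obtain ⟨P1, P2⟩ := ih (heappopA heap).2 (acc ++ [(heappopA heap).1]) hlen' hinv hacc' hbound'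
      refine ⟨P1.trans ?_, P2⟩
      rw [List.append_assoc]
      exact List.Perm.append_left acc (by simpa using hperm)

-- heap_sort sorts: a permutation of the input in ascending order
theorem pvHeapSortA_spec (nums : List Int) :
    (heapSortA nums).Perm nums ∧ (heapSortA nums).Pairwise (· ≤ ·) := by
  have Hfold : ∀ (l acc : List Int), HeapInv acc →
      HeapInv (l.foldl (fun h num => heappushA h num) acc) ∧
      (l.foldl (fun h num => heappushA h num) acc).Perm (acc ++ l) := by
    intro l
    induction l with
    | nil => intro acc hacc; exact ⟨hacc, by simp⟩
    | cons x t ih =>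
      intro acc hacc
      obtain ⟨I, P⟩ := ih (heappushA acc x) (pvHeappush_inv acc x hacc)
      refine ⟨I, P.trans ?_⟩
      exact (List.Perm.append_right t (pvHeappush_perm acc x)).trans List.perm_middle.symm
  unfold heapSortA
  obtain ⟨I, P⟩ := Hfold nums [] (by intro i hi0 hlen; simp at hlen)
  obtain ⟨Q1, Q2⟩ := pvPopAll_spec (nums.foldl (fun h num => heappushA h num) []).length
    (nums.foldl (fun h num => heappushA h num) []) []
    (le_refl _) I (by simp) (by simp)
  exact ⟨Q1.trans (by simpa using P), Q2⟩

-- an ascending permutation is unique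
theorem pvSorted_eq (s t : List Int) (hp : s.Perm t) (hs : s.Pairwise (· ≤ ·))
    (ht : t.Pairwise (· ≤ ·)) : s = t :=
  hp.eq_of_pairwise (fun a b _ _ h1 h2 => le_antisymm h1 h2) hs ht

-- bisect.insort inserts and permutes
theorem pvInsortB_perm (s : List Int) (x : Int) : (insortB s x).Perm (x :: s) := by
  induction s with
  | nil => simp [insortB]
  | cons h t ih =>
    rw [insortB]
    split
    · exact List.Perm.refl _
    · exact (ih.cons h).trans (List.Perm.swap x h t)

theorem pvInsortB_pairwise (s : List Int) (x : Int) (hs : s.Pairwise (· ≤ ·)) :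
    (insortB s x).Pairwise (· ≤ ·) := by
  induction s with
  | nil => simp [insortB]
  | cons h t ih =>
    rw [insortB]
    rw [List.pairwise_cons] at hs
    split
    · next hlt =>
      rw [List.pairwise_cons]
      refine ⟨?_, List.pairwise_cons.mpr hs⟩
      intro y hy
      rcases List.mem_cons.mp hy with rfl | hyt
      · exact le_of_lt hlt
      · exact le_trans (le_of_lt hlt) (hs.1 y hyt)
    · next hge =>
      rw [List.pairwise_cons]
      refine ⟨?_, ih hs.2⟩
      intro y hy
      rcases List.mem_cons.mp ((pvInsortB_perm t x).mem_iff.mp hy) with h1 | h1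
      · subst h1; exact not_lt.mp hge
      · exact hs.1 y h1

-- a sorted list satisfies the heap shape invariant
theorem pvPairwise_heapInv (l : List Int) (h : l.Pairwise (· ≤ ·)) : HeapInv l := by
  intro i hi0 hilen
  have := List.pairwise_iff_getElem.mp h ((i - 1) / 2) i (by omega) hilen (by omega)
  rw [List.getD_eq_getElem _ _ (by omega : (i - 1) / 2 < l.length),
    List.getD_eq_getElem _ _ hilen]
  exact this

-- the two loop bodies, named for the simulation proof (definitionally the ports' lambdas)
def pvStepA : List Int → String → List Int := fun heap item =>
  if PySem.Str.isIn "I " item then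
    match PySem.Int.ofStr? (PySem.Str.replace item "I " "") with
    | some value => heappushA heap value
    | none => heap
  else if heap.length = 0 then heap
  else if PySem.Str.isIn "D -" item then
    (heapSortA heap).tail
  else
    (heapSortA heap).dropLast

def pvStepB : List Int → String → List Int := fun s item =>
  if PySem.Str.isIn "I " item then
    match PySem.Int.ofStr? (PySem.Str.replace item "I " "") with
    | some value => insortB s value
    | none => s
  else if s = [] then s
  else if PySem.Str.isIn "D -" item then s.tail
  else s.dropLast

-- one step of the simulation: A's heap stays a heap, B's list stays sorted, they stay permutations
theorem pvStep_sim (heap s : List Int) (item : String) (HI : HeapInv heap)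
    (HS : s.Pairwise (· ≤ ·)) (HP : heap.Perm s) :
    HeapInv (pvStepA heap item) ∧ (pvStepB s item).Pairwise (· ≤ ·) ∧
    (pvStepA heap item).Perm (pvStepB s item) := by
  unfold pvStepA pvStepB
  by_cases hI : PySem.Str.isIn "I " item = true
  · rw [if_pos hI, if_pos hI]
    cases hv : PySem.Int.ofStr? (PySem.Str.replace item "I " "") with
    | none => exact ⟨HI, HS, HP⟩
    | some v =>
      refine ⟨pvHeappush_inv heap v HI, pvInsortB_pairwise s v HS, ?_⟩
      exact (pvHeappush_perm heap v).trans ((HP.cons v).trans (pvInsortB_perm s v).symm)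
  · rw [if_neg hI, if_neg hI]
    by_cases hz : heap.length = 0
    · have hs0 : s = [] := by
        have := HP.length_eq
        rw [hz] at this
        exact (List.length_eq_zero_iff.mp this.symm)
      rw [if_pos hz, if_pos hs0]
      exact ⟨HI, HS, HP⟩
    · have hs0 : ¬ s = [] := fun h => hz (by rw [HP.length_eq, h]; rfl)
      rw [if_neg hz, if_neg hs0]
      have hsort : heapSortA heap = s :=
        pvSorted_eq _ _ ((pvHeapSortA_spec heap).1.trans HP) (pvHeapSortA_spec heap).2 HS
      by_cases hD : PySem.Str.isIn "D -" item = true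
      · rw [if_pos hD, if_pos hD, hsort]
        have hpw : s.tail.Pairwise (· ≤ ·) := HS.sublist (List.tail_sublist s)
        exact ⟨pvPairwise_heapInv _ hpw, hpw, List.Perm.refl _⟩
      · rw [if_neg hD, if_neg hD, hsort]
        have hpw : s.dropLast.Pairwise (· ≤ ·) := HS.sublist (List.dropLast_sublist s)
        exact ⟨pvPairwise_heapInv _ hpw, hpw, List.Perm.refl _⟩

theorem pvLoop_sim : ∀ (ops : List String) (heap s : List Int), HeapInv heap →
    s.Pairwise (· ≤ ·) → heap.Perm s →
    HeapInv (ops.foldl pvStepA heap) ∧ (ops.foldl pvStepB s).Pairwise (· ≤ ·) ∧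
    (ops.foldl pvStepA heap).Perm (ops.foldl pvStepB s) := by
  intro ops
  induction ops with
  | nil => intro heap s HI HS HP; exact ⟨HI, HS, HP⟩
  | cons item t ih =>
    intro heap s HI HS HP
    obtain ⟨a, b, c⟩ := pvStep_sim heap s item HI HS HP
    simpa using ih (pvStepA heap item) (pvStepB s item) a b c

-- ===== VERDICT (by name: the statement is the Claim_ definition above) =====
theorem solution_spec : Claim_equal_solution := by
  intro ops _ _
  unfold Spec_solution
  obtain ⟨HI, HS, HP⟩ := pvLoop_sim ops [] [] (by intro i h1 h2; simp at h2) (by simp)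
    (List.Perm.refl [])
  have hsort : heapSortA (ops.foldl pvStepA []) = ops.foldl pvStepB [] :=
    pvSorted_eq _ _ ((pvHeapSortA_spec _).1.trans HP) (pvHeapSortA_spec _).2 HS
  have eA : solution ops =
      (if (heapSortA (ops.foldl pvStepA [])).length = 0 then "EMPTY"
       else PySem.Int.toStr ((PySem.List.pyGet? (heapSortA (ops.foldl pvStepA [])) (-1)).getD 0)
         ++ " " ++
         PySem.Int.toStr ((PySem.List.pyGet? (heapSortA (ops.foldl pvStepA [])) 0).getD 0)) := rfl
  have eB : solution_alt ops =
      (if (ops.foldl pvStepB []) = [] then "EMPTY"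
       else PySem.Int.toStr ((PySem.List.pyGet? (ops.foldl pvStepB []) (-1)).getD 0) ++ " " ++
         PySem.Int.toStr ((PySem.List.pyGet? (ops.foldl pvStepB []) 0).getD 0)) := rfl
  rw [eA, eB, hsort]
  by_cases h : ops.foldl pvStepB [] = []
  · rw [if_pos (by rw [h]; rfl), if_pos h]
  · rw [if_neg (fun hh => h (List.length_eq_zero_iff.mp hh)), if_neg h]
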